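-- pv_equiv track=rewrite | github.com/maxjerdee/contingency_count | contingency_count/log_Omega_0_estimates.py | removeAllZeroOnes
-- ===== SOURCE A (Python) =====
-- def removeAllZeroOnes(rs,cs):
--   n = len(cs)
--   temp_rs = []
--   temp_cs = cs.copy()
--   change = False
--   for r in rs:
--     if r == 0:
--       change = True
--     if r == n:
--       change = True
--       for i in range(len(temp_cs)):
--         temp_cs[i] -= 1
--     if r != 0 and r != n:
--       temp_rs.append(r)
--   m = len(temp_rs)
--   temp_cs2 = []
--   for c in temp_cs:
--     if c == 0:
--       change = True
--     if c == m:
--       change = True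
--       for i in range(len(temp_rs)):
--         temp_rs[i] -= 1
--     if c != 0 and c != m:
--       temp_cs2.append(c)
--   if change:
--     return removeAllZeroOnes(temp_rs, temp_cs2)
--   else:
--     return temp_rs, temp_cs2
-- ===== SOURCE B (Python) =====
-- def removeAllZeroOnes(rs, cs):
--     # Count the full rows/columns once per round and apply the decrement as a
--     # single batched map; iterate rounds in a loop instead of recursing.
--     rs, cs = list(rs), list(cs)
--     while True:
--         n = len(cs)
--         k = rs.count(n)
--         new_rs = [r for r in rs if r != 0 and r != n]
--         cs1 = [c - k for c in cs]
--         m = len(new_rs)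
--         k2 = cs1.count(m)
--         new_cs = [c for c in cs1 if c != 0 and c != m]
--         rs2 = [r - k2 for r in new_rs]
--         if rs2 == rs and new_cs == cs:
--             return rs, cs
--         rs, cs = rs2, new_cs
-- ===== Notes on version B (the rewrite author's own statement) =====
-- stated objective: alternative
-- what changed: Each peeling round counts the full rows/columns once and applies the decrement as one batched map plus a filter, in an iterative while-loop, replacing A's recursive rounds whose per-element inner loops decrement the opposite margin for every full row/column.
import Mathlib
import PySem

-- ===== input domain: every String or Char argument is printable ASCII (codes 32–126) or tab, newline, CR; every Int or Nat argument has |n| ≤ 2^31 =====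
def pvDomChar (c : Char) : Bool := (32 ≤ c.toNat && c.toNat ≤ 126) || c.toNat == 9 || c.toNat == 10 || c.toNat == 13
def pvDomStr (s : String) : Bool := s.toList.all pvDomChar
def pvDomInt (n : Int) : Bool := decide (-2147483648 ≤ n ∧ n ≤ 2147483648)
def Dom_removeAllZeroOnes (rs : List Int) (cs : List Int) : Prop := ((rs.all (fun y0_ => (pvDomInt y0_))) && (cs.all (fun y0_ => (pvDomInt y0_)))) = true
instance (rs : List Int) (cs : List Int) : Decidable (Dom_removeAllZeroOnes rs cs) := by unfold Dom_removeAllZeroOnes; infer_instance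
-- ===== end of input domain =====

-- B (alternative): one count + batched map + filter per round in an iterative
-- loop, instead of A's recursive rounds with per-element inner decrement loops.

-- ===== PORT A =====

-- `for i in range(len(xs)): xs[i] -= 1` (index loop, exact)
def pvDec (xs : List Int) : List Int :=
  (PySem.List.pyRange 0 xs.length 1).foldl
    (fun acc i => acc.set i.toNat (PySem.List.pyGetD acc i 0 - 1)) xs

-- one iteration of A's row loop: state (temp_rs, temp_cs, change)
def pvRowStep (n : Int) (s : List Int × List Int × Bool) (r : Int) : List Int × List Int × Bool :=
  let ch1 := if r = 0 then true else s.2.2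
  let p := if r = n then (pvDec s.2.1, true) else (s.2.1, ch1)
  let trs := if r ≠ 0 ∧ r ≠ n then s.1 ++ [r] else s.1
  (trs, p.1, p.2)

-- one iteration of A's column loop: state (temp_rs, temp_cs2, change)
def pvColStep (m : Int) (s : List Int × List Int × Bool) (c : Int) : List Int × List Int × Bool :=
  let ch1 := if c = 0 then true else s.2.2
  let p := if c = m then (pvDec s.1, true) else (s.1, ch1)
  let tcs2 := if c ≠ 0 ∧ c ≠ m then s.2.1 ++ [c] else s.2.1
  (p.1, tcs2, p.2)

lemma pvDec_aux : ∀ (xs pre : List Int),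
    (List.range' pre.length xs.length).foldl
      (fun acc k => acc.set k (PySem.List.pyGetD acc (k : Int) 0 - 1)) (pre ++ xs)
      = pre ++ xs.map (fun x => x - 1) := by
  intro xs
  induction xs with
  | nil => intro pre; simp
  | cons x xs ih =>
    intro pre
    rw [List.length_cons, List.range'_succ, List.foldl_cons]
    have hget : PySem.List.pyGetD (pre ++ x :: xs) (pre.length : Int) 0 = x := by
      rw [PySem.List.pyGetD_natCast]
      simp
    have hset : (pre ++ x :: xs).set pre.length (x - 1) = (pre ++ [x - 1]) ++ xs := by
      rw [List.set_append_right _ _ le_rfl]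
      simp
    rw [hget, hset]
    have := ih (pre ++ [x - 1])
    simp only [List.length_append, List.length_cons, List.length_nil] at this ⊢
    rw [show pre.length + 1 = pre.length + (0 + 1) by omega] at this
    rw [this]
    simp

lemma pvDec_eq (xs : List Int) : pvDec xs = xs.map (fun x => x - 1) := by
  unfold pvDec
  rw [PySem.List.pyRange_one]
  rw [List.foldl_map]
  simp only [zero_add]
  have h0 : ∀ (k : Nat) (acc : List Int),
      acc.set (Int.toNat (k : Int)) (PySem.List.pyGetD acc (k : Int) 0 - 1)
        = acc.set k (PySem.List.pyGetD acc (k : Int) 0 - 1) := by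
    intro k acc; norm_num
  have := pvDec_aux xs ([] : List Int)
  simp only [List.length_nil, List.nil_append] at this
  rw [show ((xs.length : Int) - 0).toNat = xs.length by omega]
  rw [← List.range_eq_range'] at this
  simpa using this

-- closed form of A's row pass
lemma pvRowFold_eq (n : Int) : ∀ (rs a tcs : List Int) (ch : Bool),
    rs.foldl (pvRowStep n) (a, tcs, ch) =
      (a ++ rs.filter (fun r => decide (r ≠ 0) && decide (r ≠ n)),
       tcs.map (fun c => c - (rs.count n : Int)),
       ch || rs.any (fun r => decide (r = 0) || decide (r = n))) := by
  intro rs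
  induction rs with
  | nil => intro a tcs ch; simp
  | cons r rs ih =>
    intro a tcs ch
    rw [List.foldl_cons, ih]
    by_cases h0 : r = 0 <;> by_cases hn : r = n <;>
      simp [pvRowStep, h0, hn, pvDec_eq, List.count_cons, List.map_map, Function.comp_def]
    · -- r = 0 and r = n
      have hn0 : n = 0 := by rw [← hn, h0]
      subst hn0
      simp [List.map_map, Function.comp_def]
      intro c _
      ring
    · -- r = 0 and r ≠ n
      have : ¬ ((0:ℤ) = n) := by rw [← h0]; exact hn
      simp [this]
    · -- r ≠ 0 and r = n
      intro c _
      ring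

-- closed form of A's column pass
lemma pvColFold_eq (m : Int) : ∀ (cs trs a : List Int) (ch : Bool),
    cs.foldl (pvColStep m) (trs, a, ch) =
      (trs.map (fun r => r - (cs.count m : Int)),
       a ++ cs.filter (fun c => decide (c ≠ 0) && decide (c ≠ m)),
       ch || cs.any (fun c => decide (c = 0) || decide (c = m))) := by
  intro cs
  induction cs with
  | nil => intro trs a ch; simp
  | cons c cs ih =>
    intro trs a ch
    rw [List.foldl_cons, ih]
    by_cases h0 : c = 0 <;> by_cases hm : c = m <;>
      simp [pvColStep, h0, hm, pvDec_eq, List.count_cons, List.map_map, Function.comp_def]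
    · -- c = 0 and c = m
      have hm0 : m = 0 := by rw [← hm, h0]
      subst hm0
      simp [List.map_map, Function.comp_def]
      intro r _
      ring
    · -- c = 0 and c ≠ m
      have : ¬ ((0:ℤ) = m) := by rw [← h0]; exact hm
      simp [this]
    · -- c ≠ 0 and c = m
      intro r _
      ring

-- the change flag forces a strict shrink (A's recursion terminates)
lemma pvA_dec (rs cs : List Int)
    (h : (((rs.foldl (pvRowStep (cs.length : Int)) ([], cs, false)).2.1).foldl
            (pvColStep (((rs.foldl (pvRowStep (cs.length : Int)) ([], cs, false)).1.length : Int)))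
            ((rs.foldl (pvRowStep (cs.length : Int)) ([], cs, false)).1, [],
             (rs.foldl (pvRowStep (cs.length : Int)) ([], cs, false)).2.2)).2.2 = true) :
    (((rs.foldl (pvRowStep (cs.length : Int)) ([], cs, false)).2.1).foldl
        (pvColStep (((rs.foldl (pvRowStep (cs.length : Int)) ([], cs, false)).1.length : Int)))
        ((rs.foldl (pvRowStep (cs.length : Int)) ([], cs, false)).1, [],
         (rs.foldl (pvRowStep (cs.length : Int)) ([], cs, false)).2.2)).1.length +
    (((rs.foldl (pvRowStep (cs.length : Int)) ([], cs, false)).2.1).foldl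
        (pvColStep (((rs.foldl (pvRowStep (cs.length : Int)) ([], cs, false)).1.length : Int)))
        ((rs.foldl (pvRowStep (cs.length : Int)) ([], cs, false)).1, [],
         (rs.foldl (pvRowStep (cs.length : Int)) ([], cs, false)).2.2)).2.1.length
      < rs.length + cs.length := by
  rw [pvRowFold_eq, pvColFold_eq] at h ⊢
  simp only [List.nil_append, List.length_map, List.length_append, List.length_nil,
    Bool.false_or, Bool.or_eq_true, List.any_eq_true] at h ⊢
  have h1 : (rs.filter (fun r => decide (r ≠ 0) && decide (r ≠ (cs.length : Int)))).length
      ≤ rs.length := List.length_filter_le _ _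
  rcases h with hrow | hcol
  · obtain ⟨x, hx, hx2⟩ := hrow
    have : (rs.filter (fun r => decide (r ≠ 0) && decide (r ≠ (cs.length : Int)))).length
        < rs.length := by
      rw [List.length_filter_lt_length_iff_exists]
      exact ⟨x, hx, by simp at hx2 ⊢; omega⟩
    have h2 := List.length_filter_le
      (fun c => decide (c ≠ 0) && decide (c ≠ ((rs.filter (fun r => decide (r ≠ 0) && decide (r ≠ (cs.length : Int)))).length : Int)))
      (cs.map (fun c => c - (rs.count (cs.length : Int) : Int)))
    rw [List.length_map] at h2
    exact add_lt_add_of_lt_of_le this h2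
  · obtain ⟨x, hx, hx2⟩ := hcol
    have : ((cs.map (fun c => c - (rs.count (cs.length : Int) : Int))).filter
        (fun c => decide (c ≠ 0) && decide (c ≠ ((rs.filter (fun r => decide (r ≠ 0) && decide (r ≠ (cs.length : Int)))).length : Int)))).length
        < cs.length := by
      have := (List.length_filter_lt_length_iff_exists
        (l := cs.map (fun c => c - (rs.count (cs.length : Int) : Int)))
        (p := fun c => decide (c ≠ 0) && decide (c ≠ ((rs.filter (fun r => decide (r ≠ 0) && decide (r ≠ (cs.length : Int)))).length : Int)))).mpr
        ⟨x, hx, by simp at hx2 ⊢; omega⟩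
      rwa [List.length_map] at this
    exact add_lt_add_of_le_of_lt h1 this

def removeAllZeroOnes (rs : List Int) (cs : List Int) : List Int × List Int :=
  let n : Int := cs.length
  let s1 := rs.foldl (pvRowStep n) ([], cs, false)
  let m : Int := s1.1.length
  let s2 := s1.2.1.foldl (pvColStep m) (s1.1, [], s1.2.2)
  if h : s2.2.2 = true then removeAllZeroOnes s2.1 s2.2.1 else (s2.1, s2.2.1)
termination_by rs.length + cs.length
decreasing_by simp only [s2, s1, m, n, List.foldl_attach] at h ⊢; exact pvA_dec rs cs h

-- ===== PORT B =====

-- one round of B's while loop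
def pvRound (rs cs : List Int) : List Int × List Int :=
  let n : Int := cs.length
  let k : Int := rs.count n
  let new_rs := rs.filter (fun r => decide (r ≠ 0) && decide (r ≠ n))
  let cs1 := cs.map (fun c => c - k)
  let m : Int := new_rs.length
  let k2 : Int := cs1.count m
  let new_cs := cs1.filter (fun c => decide (c ≠ 0) && decide (c ≠ m))
  (new_rs.map (fun r => r - k2), new_cs)

lemma pv_filter_full (l : List Int) (p : Int → Bool)
    (h : (l.filter p).length = l.length) : (∀ a ∈ l, p a) ∧ l.filter p = l := by
  have hall : ∀ a ∈ l, p a := by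
    intro a ha
    by_contra hp
    have := List.length_filter_lt_length_iff_exists (p := p) (l := l) |>.mpr
      ⟨a, ha, by simpa using hp⟩
    omega
  exact ⟨hall, List.filter_eq_self.mpr hall⟩

lemma pvRound_eq_self (rs cs : List Int)
    (hl : ¬ ((pvRound rs cs).1.length + (pvRound rs cs).2.length < rs.length + cs.length)) :
    (pvRound rs cs).1 = rs ∧ (pvRound rs cs).2 = cs := by
  simp only [pvRound] at hl ⊢
  push_neg at hl
  rw [List.length_map] at hl
  have l1 := List.length_filter_le (fun r => decide (r ≠ 0) && decide (r ≠ (cs.length : Int))) rs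
  have l2 := List.length_filter_le
    (fun c => decide (c ≠ 0) && decide (c ≠ ((rs.filter (fun r => decide (r ≠ 0) && decide (r ≠ (cs.length : Int)))).length : Int)))
    (cs.map (fun c => c - (rs.count (cs.length : Int) : Int)))
  rw [List.length_map] at l2
  have e1 : (rs.filter (fun r => decide (r ≠ 0) && decide (r ≠ (cs.length : Int)))).length = rs.length := by omega
  obtain ⟨hallr, hfr⟩ := pv_filter_full rs _ e1
  have hk : rs.count (cs.length : Int) = 0 := by
    rw [List.count_eq_zero]
    intro hmem
    have := hallr _ hmem
    simp at this
  rw [hk] at l2 hl ⊢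
  have hcs1 : cs.map (fun c => c - ((0 : Nat) : Int)) = cs := by
    simp
  rw [hcs1] at l2 hl ⊢
  rw [hfr] at l2 hl ⊢
  have e2 : (cs.filter (fun c => decide (c ≠ 0) && decide (c ≠ (rs.length : Int)))).length = cs.length := by omega
  obtain ⟨hallc, hfc⟩ := pv_filter_full cs _ e2
  have hk2 : cs.count (rs.length : Int) = 0 := by
    rw [List.count_eq_zero]
    intro hmem
    have := hallc _ hmem
    simp at this
  rw [hk2, hfc]
  constructor
  · simp
  · rfl

lemma pvRound_dec (rs cs : List Int)
    (h : ¬ ((pvRound rs cs).1 = rs ∧ (pvRound rs cs).2 = cs)) :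
    (pvRound rs cs).1.length + (pvRound rs cs).2.length < rs.length + cs.length := by
  by_contra hlt
  exact h (pvRound_eq_self rs cs hlt)

def removeAllZeroOnes_alt (rs : List Int) (cs : List Int) : List Int × List Int :=
  let p := pvRound rs cs
  if h : p.1 = rs ∧ p.2 = cs then (rs, cs) else removeAllZeroOnes_alt p.1 p.2
termination_by rs.length + cs.length
decreasing_by simp only [p] at h ⊢; exact pvRound_dec rs cs h

-- ===== PRECONDITION & SPEC =====
def Spec_removeAllZeroOnes (rs : List Int) (cs : List Int) (out : List Int × List Int) : Prop := out = removeAllZeroOnes_alt rs cs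
instance (rs : List Int) (cs : List Int) (out : List Int × List Int) : Decidable (Spec_removeAllZeroOnes rs cs out) := by unfold Spec_removeAllZeroOnes; infer_instance

-- ===== CLAIM (what is proved, stated in full; the proofs are below) =====
def Claim_equal_removeAllZeroOnes : Prop := ∀ (rs : List Int) (cs : List Int), Dom_removeAllZeroOnes rs cs → Spec_removeAllZeroOnes rs cs (removeAllZeroOnes rs cs)

-- ===== LEMMAS AND PROOFS =====

lemma pvA_round_eq (rs cs : List Int) :
    (((rs.foldl (pvRowStep (cs.length : Int)) ([], cs, false)).2.1).foldl
        (pvColStep (((rs.foldl (pvRowStep (cs.length : Int)) ([], cs, false)).1.length : Int)))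
        ((rs.foldl (pvRowStep (cs.length : Int)) ([], cs, false)).1, [],
         (rs.foldl (pvRowStep (cs.length : Int)) ([], cs, false)).2.2)).1 = (pvRound rs cs).1
    ∧ (((rs.foldl (pvRowStep (cs.length : Int)) ([], cs, false)).2.1).foldl
        (pvColStep (((rs.foldl (pvRowStep (cs.length : Int)) ([], cs, false)).1.length : Int)))
        ((rs.foldl (pvRowStep (cs.length : Int)) ([], cs, false)).1, [],
         (rs.foldl (pvRowStep (cs.length : Int)) ([], cs, false)).2.2)).2.1 = (pvRound rs cs).2 := by
  simp only [pvRowFold_eq, pvColFold_eq, pvRound, List.nil_append]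
  exact ⟨trivial, trivial⟩

lemma pvA_change_false (rs cs : List Int)
    (h : (((rs.foldl (pvRowStep (cs.length : Int)) ([], cs, false)).2.1).foldl
            (pvColStep (((rs.foldl (pvRowStep (cs.length : Int)) ([], cs, false)).1.length : Int)))
            ((rs.foldl (pvRowStep (cs.length : Int)) ([], cs, false)).1, [],
             (rs.foldl (pvRowStep (cs.length : Int)) ([], cs, false)).2.2)).2.2 = false) :
    pvRound rs cs = (rs, cs) := by
  simp only [pvRowFold_eq, pvColFold_eq, List.nil_append, List.length_map, Bool.false_or,
    Bool.or_eq_false_iff, List.any_eq_false] at h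
  obtain ⟨hr, hc⟩ := h
  have hfr : rs.filter (fun r => decide (r ≠ 0) && decide (r ≠ (cs.length : Int))) = rs :=
    List.filter_eq_self.mpr (fun a ha => by have := hr a ha; simp at this ⊢; tauto)
  have hk : rs.count (cs.length : Int) = 0 :=
    List.count_eq_zero.mpr (fun hm => by have := hr _ hm; simp at this)
  rw [hfr, hk] at hc
  have hmap : cs.map (fun c => c - ((0 : Nat) : Int)) = cs := by simp
  rw [hmap] at hc
  have hfc : cs.filter (fun c => decide (c ≠ 0) && decide (c ≠ (rs.length : Int))) = cs :=
    List.filter_eq_self.mpr (fun a ha => by have := hc a ha; simp at this ⊢; tauto)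
  have hk2 : cs.count (rs.length : Int) = 0 :=
    List.count_eq_zero.mpr (fun hm => by have := hc _ hm; simp at this)
  simp only [pvRound]
  rw [hfr, hk, hmap, hk2, hfc]
  simp

lemma pv_main : ∀ (N : Nat) (rs cs : List Int), rs.length + cs.length ≤ N →
    removeAllZeroOnes rs cs = removeAllZeroOnes_alt rs cs := by
  intro N
  induction N with
  | zero =>
    intro rs cs h
    have h1 : rs = [] := by
      cases rs
      · rfl
      · simp at h
    have h2 : cs = [] := by
      cases cs
      · rfl
      · simp at h
    subst h1; subst h2
    rw [removeAllZeroOnes, removeAllZeroOnes_alt]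
    simp [pvRound]
  | succ N ih =>
    intro rs cs hle
    rw [removeAllZeroOnes, removeAllZeroOnes_alt]
    split
    · next hch =>
        split
        · next hb =>
            exfalso
            have hdec := pvA_dec rs cs hch
            rw [(pvA_round_eq rs cs).1, (pvA_round_eq rs cs).2] at hdec
            rw [hb.1, hb.2] at hdec
            omega
        · next hb =>
            rw [(pvA_round_eq rs cs).1, (pvA_round_eq rs cs).2]
            apply ih
            have := pvRound_dec rs cs hb
            omega
    · next hch =>
        have hfalse := Bool.eq_false_iff.mpr hch
        have hround := pvA_change_false rs cs hfalse
        split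
        · next hb =>
            rw [(pvA_round_eq rs cs).1, (pvA_round_eq rs cs).2, hround]
        · next hb =>
            exact absurd ⟨congrArg Prod.fst hround, congrArg Prod.snd hround⟩ hb

-- ===== VERDICT (by name: the statement is the Claim_ definition above) =====
theorem removeAllZeroOnes_spec : Claim_equal_removeAllZeroOnes := by
  intro rs cs _
  unfold Spec_removeAllZeroOnes
  exact pv_main (rs.length + cs.length) rs cs le_rfl
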